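-- pv_equiv track=rewrite | github.com/andredoumad/foobarWithGoogle | 20_07_27.py | solution
-- ===== SOURCE A (Python) =====
-- def solution(xs):
--     if len(xs) ==1:
--         return str(xs[0])
--     posPairs = []
--     largestNegative = None
--     largestNegativeIndex = 0
--     negPairs = []
--     for panel in xs:
--         if panel != 0:
--             if panel > 0:
--                 posPairs.append(panel)
--             else:
--                 if largestNegative == None or largestNegative < panel:
--                     largestNegative = panel
--                     negPairs.append(panel)
--                     largestNegativeIndex = len(negPairs)-1
--                 else:
--                     negPairs.append(panel)
--
--     if len(negPairs) == 1:
--         negPairs.pop()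
--     if len(posPairs) == 0 and len(negPairs) == 0:
--         return str(0)
--     if len(negPairs) % 2 != 0:
--         negPairs.pop(largestNegativeIndex)
--     allPairs = posPairs + negPairs
--     def ubermensch(powerArray, product):
--         if powerArray:
--             val = powerArray.pop()
--             product *= val
--             return ubermensch(powerArray, product)
--         return product
--     return str(ubermensch(allPairs, 1))
-- ===== SOURCE B (Python) =====
-- def solution(xs):
--     if len(xs) == 1:
--         return str(xs[0])
--     nonzero = [x for x in xs if x != 0]
--     if not nonzero:
--         return str(0)
--     negs = [x for x in nonzero if x < 0]
--     if len(negs) % 2 != 0: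
--         nonzero.remove(max(negs))
--         if not nonzero:
--             return str(0)
--     prod = 1
--     for x in nonzero:
--         prod *= x
--     return str(prod)
-- ===== Notes on version B (the rewrite author's own statement) =====
-- stated objective: simpler
-- what changed: Replaced A's partition-with-tracked-largest-negative-index and its recursive pop-from-the-end product fold by a plain filter/max/remove decomposition with an iterative product loop.
import Mathlib
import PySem

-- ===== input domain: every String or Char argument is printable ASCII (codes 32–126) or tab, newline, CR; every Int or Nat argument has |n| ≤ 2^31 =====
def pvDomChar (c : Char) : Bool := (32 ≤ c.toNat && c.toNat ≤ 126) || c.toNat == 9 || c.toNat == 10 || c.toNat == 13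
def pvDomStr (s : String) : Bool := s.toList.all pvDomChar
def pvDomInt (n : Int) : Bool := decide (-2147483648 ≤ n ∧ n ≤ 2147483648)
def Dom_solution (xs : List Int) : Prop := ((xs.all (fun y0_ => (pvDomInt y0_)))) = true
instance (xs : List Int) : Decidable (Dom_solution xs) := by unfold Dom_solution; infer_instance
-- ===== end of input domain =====

-- B replaces A's partition-with-tracked-largest-negative-index and its recursive
-- pop-from-the-end product fold by a plain filter/max/remove decomposition with an
-- iterative product loop (objective: simpler).

-- ===== PORT A =====
-- loop body; state: (posPairs, largestNegative, largestNegativeIndex, negPairs)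
def solStep (st : List Int × Option Int × Nat × List Int) (panel : Int) :
    List Int × Option Int × Nat × List Int :=
  let pos := st.1
  let ln := st.2.1
  let lni := st.2.2.1
  let neg := st.2.2.2
  if panel ≠ 0 then
    if panel > 0 then (pos ++ [panel], ln, lni, neg)
    else
      match ln with
      | none => (pos, some panel, neg.length, neg ++ [panel])
      | some l =>
        if l < panel then (pos, some panel, neg.length, neg ++ [panel])
        else (pos, ln, lni, neg ++ [panel])
  else st

-- the recursive helper: product *= powerArray.pop() until the list is empty
def ubermensch (l : List Int) (product : Int) : Int :=
  if h : l = [] then product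
  else ubermensch l.dropLast (product * l.getLast h)
termination_by l.length
decreasing_by cases l with
  | nil => exact absurd rfl h
  | cons a as => simp

def solution (xs : List Int) : String :=
  if xs.length = 1 then PySem.Int.toStr xs.headI
  else
    let st := xs.foldl solStep ([], none, 0, [])
    let pos := st.1
    let lni := st.2.2.1
    let neg := st.2.2.2
    let neg1 := if neg.length = 1 then neg.dropLast else neg
    if pos = [] ∧ neg1 = [] then PySem.Int.toStr 0
    else
      let neg2 := if neg1.length % 2 ≠ 0 then neg1.eraseIdx lni else neg1
      PySem.Int.toStr (ubermensch (pos ++ neg2) 1)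

-- ===== PORT B =====
def solution_alt (xs : List Int) : String :=
  if xs.length = 1 then PySem.Int.toStr xs.headI
  else
    let nonzero := xs.filter (fun x => x ≠ 0)
    if nonzero = [] then PySem.Int.toStr 0
    else
      let negs := nonzero.filter (fun x => x < 0)
      if negs.length % 2 ≠ 0 then
        let nonzero2 := nonzero.erase (negs.max?.getD 0)
        if nonzero2 = [] then PySem.Int.toStr 0
        else PySem.Int.toStr (nonzero2.foldl (· * ·) 1)
      else PySem.Int.toStr (nonzero.foldl (· * ·) 1)

-- ===== PRECONDITION & SPEC =====
def Spec_solution (xs : List Int) (out : String) : Prop := out = solution_alt xs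
instance (xs : List Int) (out : String) : Decidable (Spec_solution xs out) := by unfold Spec_solution; infer_instance

-- ===== CLAIM (what is proved, stated in full; the proofs are below) =====
def Claim_equal_solution : Prop := ∀ (xs : List Int), Dom_solution xs → Spec_solution xs (solution xs)

-- ===== LEMMAS AND PROOFS =====

theorem ubermensch_eq (l : List Int) (p : Int) : ubermensch l p = p * l.prod := by
  induction l using List.reverseRecOn generalizing p with
  | nil => simp [ubermensch]
  | append_singleton as a ih =>
      rw [ubermensch]
      simp [ih]
      ring

-- invariant of A's loop
def solInv (xs : List Int) (st : List Int × Option Int × Nat × List Int) : Prop :=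
  st.1 = xs.filter (fun x => decide (0 < x)) ∧
  st.2.2.2 = xs.filter (fun x => decide (x < 0)) ∧
  ((st.2.1 = none ∧ st.2.2.2 = []) ∨
   (∃ m, st.2.1 = some m ∧ m ∈ st.2.2.2 ∧ (∀ x ∈ st.2.2.2, x ≤ m) ∧
     st.2.2.1 = st.2.2.2.idxOf m))

theorem solInv_foldl (xs : List Int) : solInv xs (xs.foldl solStep ([], none, 0, [])) := by
  induction xs using List.reverseRecOn with
  | nil => exact ⟨rfl, rfl, Or.inl ⟨rfl, rfl⟩⟩
  | append_singleton as a ih =>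
      rw [List.foldl_append, List.foldl_cons, List.foldl_nil]
      rcases hq : as.foldl solStep ([], none, 0, []) with ⟨pos, ln, lni, neg⟩
      rw [hq] at ih
      obtain ⟨hpos, hneg, hdisj⟩ := ih
      simp only at hpos hneg hdisj
      by_cases ha0 : a = 0
      · subst ha0
        have hstep : solStep (pos, ln, lni, neg) 0 = (pos, ln, lni, neg) := by
          simp [solStep]
        rw [hstep]
        exact ⟨by simp [List.filter_append, hpos], by simp [List.filter_append, hneg], hdisj⟩
      · by_cases hap : a > 0
        · have hstep : solStep (pos, ln, lni, neg) a = (pos ++ [a], ln, lni, neg) := by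
            simp [solStep, ha0, hap]
          rw [hstep]
          have hnlt : ¬ (a < 0) := by omega
          exact ⟨by simp [List.filter_append, hpos, hap],
                 by simp [List.filter_append, hneg, hnlt], hdisj⟩
        · have han : a < 0 := by omega
          have hnp : ¬ (0 < a) := by omega
          rcases hdisj with ⟨hlnone, hnegnil⟩ | ⟨m, hlsome, hm, hmax, hidx⟩
          · subst hlnone
            subst hnegnil
            have hstep : solStep (pos, none, lni, ([] : List Int)) a
                = (pos, some a, 0, [a]) := by
              simp [solStep, ha0, hap]
            rw [hstep]
            refine ⟨by simp [List.filter_append, hpos, hnp], ?_, Or.inr ⟨a, rfl, ?_, ?_, ?_⟩⟩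
            · simp only [List.filter_append, ← hneg]
              simp [han]
            · simp
            · intro x hx; simp at hx; omega
            · simp
          · subst hlsome
            by_cases hlt : m < a
            · have hstep : solStep (pos, some m, lni, neg) a
                  = (pos, some a, neg.length, neg ++ [a]) := by
                simp [solStep, ha0, hap, hlt]
              rw [hstep]
              have hnotmem : a ∉ neg := fun hmem => absurd (hmax a hmem) (by omega)
              refine ⟨by simp [List.filter_append, hpos, hnp], ?_,
                      Or.inr ⟨a, rfl, by simp, ?_, ?_⟩⟩
              · simp only [List.filter_append, ← hneg]
                simp [han]
              · intro x hx
                rcases List.mem_append.1 hx with h | h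
                · have := hmax x h; omega
                · simp at h; omega
              · rw [List.idxOf_append_of_notMem hnotmem]; simp
            · have hstep : solStep (pos, some m, lni, neg) a
                  = (pos, some m, lni, neg ++ [a]) := by
                simp [solStep, ha0, hap, hlt]
              rw [hstep]
              refine ⟨by simp [List.filter_append, hpos, hnp], ?_,
                      Or.inr ⟨m, rfl, List.mem_append.2 (Or.inl hm), ?_, ?_⟩⟩
              · simp only [List.filter_append, ← hneg]
                simp [han]
              · intro x hx
                rcases List.mem_append.1 hx with h | h
                · exact hmax x h
                · simp at h; omega
              · rw [List.idxOf_append_of_mem hm]; exact hidx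

theorem nonzero_perm (xs : List Int) :
    (xs.filter (fun x => decide (x ≠ 0))).Perm
      (xs.filter (fun x => decide (0 < x)) ++ xs.filter (fun x => decide (x < 0))) := by
  induction xs with
  | nil => simp
  | cons a as ih =>
      by_cases h0 : a = 0
      · subst h0; simpa using ih
      · by_cases hp : 0 < a
        · have hn : ¬ a < 0 := by omega
          simpa [h0, hp, hn] using ih.cons a
        · have hn : a < 0 := by omega
          have e1 : (a :: as).filter (fun x => decide (x ≠ 0))
              = a :: as.filter (fun x => decide (x ≠ 0)) := by simp [h0]
          have e2 : (a :: as).filter (fun x => decide (0 < x))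
              = as.filter (fun x => decide (0 < x)) := by simp [hp]
          have e3 : (a :: as).filter (fun x => decide (x < 0))
              = a :: as.filter (fun x => decide (x < 0)) := by simp [hn]
          rw [e1, e2, e3]
          exact (ih.cons a).trans List.perm_middle.symm

theorem negs_eq (xs : List Int) :
    (xs.filter (fun x => decide (x ≠ 0))).filter (fun x => decide (x < 0))
      = xs.filter (fun x => decide (x < 0)) := by
  rw [List.filter_filter]
  apply List.filter_congr
  intro x _
  by_cases h : x < 0
  · have h2 : x ≠ 0 := by omega
    simp [h, h2]
  · simp [h]

-- ===== VERDICT (by name: the statement is the Claim_ definition above) =====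
theorem solution_spec : Claim_equal_solution := by
  intro xs _
  unfold Spec_solution solution solution_alt
  by_cases hlen : xs.length = 1
  · rw [if_pos hlen, if_pos hlen]
  · rw [if_neg hlen, if_neg hlen]
    have hinv := solInv_foldl xs
    rcases hq : xs.foldl solStep ([], none, 0, []) with ⟨pos, ln, lni, neg⟩
    rw [hq] at hinv
    obtain ⟨hpos, hneg, hdisj⟩ := hinv
    simp only at hpos hneg hdisj ⊢
    have hperm : (xs.filter (fun x => decide (x ≠ 0))).Perm (pos ++ neg) := by
      rw [hpos, hneg]; exact nonzero_perm xs
    set NZ := xs.filter (fun x => decide (x ≠ 0)) with hNZ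
    have hnegs : NZ.filter (fun x => decide (x < 0)) = neg := by
      rw [hNZ, negs_eq, hneg]
    have hNZnil : NZ = [] ↔ (pos = [] ∧ neg = []) := by
      constructor
      · intro h
        have h2 : pos ++ neg = [] := (h ▸ hperm).symm.eq_nil
        exact List.eq_nil_of_append_eq_nil h2
      · rintro ⟨h1, h2⟩
        have h3 := hperm
        rw [h1, h2] at h3
        exact h3.eq_nil
    have hposmem : ∀ x ∈ pos, 0 < x := by
      intro x hx; rw [hpos] at hx
      exact of_decide_eq_true (List.mem_filter.mp hx).2
    rcases hdisj with ⟨hlnone, hnegnil⟩ | ⟨m, hlsome, hm, hmax, hidx⟩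
    · -- no negatives at all
      subst hnegnil
      rw [List.append_nil] at hperm
      rw [hnegs]
      have hcond : (if List.length ([] : List Int) = 1
          then List.dropLast ([] : List Int) else ([] : List Int)) = [] := by simp
      rw [hcond]
      have hm2 : ¬ (List.length ([] : List Int) % 2 ≠ 0) := by simp
      by_cases hposnil : pos = []
      · rw [if_pos ⟨hposnil, rfl⟩, if_pos (hNZnil.2 ⟨hposnil, rfl⟩)]
      · have hNZne : NZ ≠ [] := fun h => hposnil (hNZnil.1 h).1
        rw [if_neg (fun h => hposnil h.1), if_neg hNZne, if_neg hm2, if_neg hm2]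
        congr 1
        rw [ubermensch_eq, one_mul, List.append_nil, ← List.prod_eq_foldl]
        exact hperm.prod_eq.symm
    · -- at least one negative; m is the largest
      subst hlsome
      have hnegne : neg ≠ [] := List.ne_nil_of_mem hm
      have hNZne : NZ ≠ [] := fun h => hnegne (hNZnil.1 h).2
      have hmneg : m < 0 := by
        rw [hneg] at hm
        exact of_decide_eq_true (List.mem_filter.mp hm).2
      have hmnotpos : m ∉ pos := fun h => absurd (hposmem m h) (by omega)
      have hmaxval : (neg.max?.getD 0) = m := by
        have h1 : neg.max? = some m := List.max?_eq_some_iff.2 ⟨hm, hmax⟩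
        rw [h1]; rfl
      have heraseperm : (NZ.erase m).Perm (pos ++ neg.erase m) := by
        have h1 := hperm.erase m
        rwa [List.erase_append_right _ hmnotpos] at h1
      have herase_idx : neg.eraseIdx lni = neg.erase m := by
        rw [hidx]; exact List.eraseIdx_idxOf_eq_erase m neg
      rw [hnegs, hmaxval]
      by_cases hone : neg.length = 1
      · -- exactly one negative (= m): A pops it, B erases the max
        have hnegm : neg = [m] := by
          cases neg with
          | nil => simp at hone
          | cons b bs =>
            cases bs with
            | nil => simp at hm; rw [hm]
            | cons c cs => simp at hone
        subst hnegm
        have hcond : (if List.length ([m] : List Int) = 1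
            then List.dropLast ([m] : List Int) else ([m] : List Int)) = [] := by simp
        rw [hcond]
        have hoddm : List.length ([m] : List Int) % 2 ≠ 0 := by simp
        rw [if_pos hoddm]
        have heraseNZ : (NZ.erase m).Perm pos := by
          have h1 : ([m] : List Int).erase m = [] := by simp
          simpa [h1] using heraseperm
        by_cases hposnil : pos = []
        · have hEnil : NZ.erase m = [] := by
            have h1 := heraseNZ
            rw [hposnil] at h1
            exact h1.eq_nil
          rw [if_pos ⟨hposnil, rfl⟩, if_neg hNZne, if_pos hEnil]
        · have hEne : NZ.erase m ≠ [] := fun h => hposnil ((h ▸ heraseNZ).symm.eq_nil)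
          have hm2 : ¬ (List.length ([] : List Int) % 2 ≠ 0) := by simp
          rw [if_neg (fun h => hposnil h.1), if_neg hNZne, if_neg hEne, if_neg hm2]
          congr 1
          rw [ubermensch_eq, one_mul, List.append_nil, ← List.prod_eq_foldl]
          exact heraseNZ.prod_eq.symm
      · -- two or more negatives
        rw [if_neg hone, if_neg (fun (h : pos = [] ∧ neg = []) => hnegne h.2), if_neg hNZne]
        by_cases hodd : neg.length % 2 ≠ 0
        · have hEne : NZ.erase m ≠ [] := by
            intro h
            have h2 : pos ++ neg.erase m = [] := (h ▸ heraseperm).symm.eq_nil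
            have h3 := (List.eq_nil_of_append_eq_nil h2).2
            have h4 : (neg.erase m).length = neg.length - 1 := List.length_erase_of_mem hm
            rw [h3] at h4
            have h5 := List.length_pos_of_ne_nil hnegne
            simp at h4
            omega
          rw [if_pos hodd, if_pos hodd, if_neg hEne]
          congr 1
          rw [ubermensch_eq, one_mul, ← List.prod_eq_foldl, herase_idx]
          exact heraseperm.prod_eq.symm
        · rw [if_neg hodd, if_neg hodd]
          congr 1
          rw [ubermensch_eq, one_mul, ← List.prod_eq_foldl]
          exact hperm.prod_eq.symm
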